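-- pv_equiv track=rewrite | github.com/Sovanno/Crypt | lab2.py | solve_system_of_congruences
-- ===== SOURCE A (Python) =====
-- def search_nod(a, b):
--     if a == 0:
--         return b, 0, 1
--     nod, x1, y1 = search_nod(b % a, a)
--     x = y1 - (b // a) * x1
--     y = x1
--     return nod, x, y
--
-- def solve_congruence(a, b, m):
--     nod, x, y = search_nod(a, m)
--     if b % nod != 0:
--         return None
--     else:
--         x0 = (x * (b // nod)) % m
--         solutions = [(x0 + i * (m // nod)) % m for i in range(nod)]
--         return solutions
--
-- def solve_system_of_congruences(a, b, c, d, m=32):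
--     if (a - c) < 0:
--         solutions_x = solve_congruence(-(a - c), -(b - d), m)
--     else:
--         solutions_x = solve_congruence(a - c, b - d, m)
--     if not solutions_x:
--         return None, None
--     y = [(b - a * x) % m for x in solutions_x]
--     return solutions_x, y
-- ===== SOURCE B (Python) =====
-- def ext_gcd(a, b):
--     # iterative extended Euclid: returns (g, s, t) with s*a + t*b == g
--     old_r, r = a, b
--     old_s, s = 1, 0
--     old_t, t = 0, 1
--     while r != 0:
--         q = old_r // r
--         old_r, r = r, old_r - q * r
--         old_s, s = s, old_s - q * s
--         old_t, t = t, old_t - q * t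
--     return old_r, old_s, old_t
--
-- def solve_system_of_congruences(a, b, c, d, m=32):
--     p, q = (c - a, d - b) if a < c else (a - c, b - d)
--     g, _, x = ext_gcd(m, p)
--     if q % g != 0:
--         return None, None
--     x0 = x * (q // g) % m
--     step = m // g
--     xs = [(x0 + i * step) % m for i in range(g)]
--     if not xs:
--         return None, None
--     ys = [(b - a * x) % m for x in xs]
--     return xs, ys
-- ===== Notes on version B (the rewrite author's own statement) =====
-- stated objective: alternative
-- what changed: Replaces the recursive extended-Euclid helper search_nod by an iterative three-pair extended Euclidean loop (while r != 0, simultaneous (old_r,r)/(old_s,s)/(old_t,t) updates) that yields the same gcd and Bezout coefficient, and inlines the congruence solving with the empty-solution check folded into one function.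
import Mathlib
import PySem

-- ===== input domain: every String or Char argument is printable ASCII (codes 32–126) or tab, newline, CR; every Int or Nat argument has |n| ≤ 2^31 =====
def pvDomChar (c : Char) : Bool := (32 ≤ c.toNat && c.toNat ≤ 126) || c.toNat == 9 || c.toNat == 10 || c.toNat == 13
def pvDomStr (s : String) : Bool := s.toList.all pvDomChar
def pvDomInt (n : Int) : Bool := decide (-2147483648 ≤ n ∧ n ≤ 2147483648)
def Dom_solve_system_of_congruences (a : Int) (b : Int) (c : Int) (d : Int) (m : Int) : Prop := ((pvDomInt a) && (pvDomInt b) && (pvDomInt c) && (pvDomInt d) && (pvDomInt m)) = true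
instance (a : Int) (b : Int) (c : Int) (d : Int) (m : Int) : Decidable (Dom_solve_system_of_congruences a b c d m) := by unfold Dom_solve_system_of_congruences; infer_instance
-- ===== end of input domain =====

-- B replaces the recursive extended Euclid `search_nod` by an iterative three-pair
-- extended Euclidean loop (objective: alternative decomposition; same asymptotic cost).

-- ===== PORT A =====
-- search_nod: recursive extended Euclid, reduces the FIRST argument via b % a.
def search_nod (a : Int) (b : Int) : Int × Int × Int :=
  if h : a = 0 then (b, 0, 1)
  else
    let r := search_nod (PySem.Int.mod b a) a
    (r.1, r.2.2 - (PySem.Int.floordiv b a) * r.2.1, r.2.1)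
termination_by a.natAbs
decreasing_by
  rcases lt_trichotomy a 0 with ha | ha | ha
  · have hb := PySem.Int.mod_neg_bounds b ha
    omega
  · exact absurd ha h
  · have h1 := PySem.Int.mod_nonneg b ha
    have h2 := PySem.Int.mod_lt b ha
    omega

def solve_congruence (a : Int) (b : Int) (m : Int) : Option (List Int) :=
  let r := search_nod a m
  if PySem.Int.mod b r.1 ≠ 0 then none
  else
    let x0 := PySem.Int.mod (r.2.1 * PySem.Int.floordiv b r.1) m
    some ((PySem.List.pyRange 0 r.1 1).map (fun i => PySem.Int.mod (x0 + i * PySem.Int.floordiv m r.1) m))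

def solve_system_of_congruences (a : Int) (b : Int) (c : Int) (d : Int) (m : Int) : Option (List Int) × Option (List Int) :=
  let solutions_x := if a - c < 0 then solve_congruence (-(a - c)) (-(b - d)) m else solve_congruence (a - c) (b - d) m
  -- `if not solutions_x`: falsy = None or the empty list
  match solutions_x with
  | none => (none, none)
  | some [] => (none, none)
  | some xs => (some xs, some (xs.map (fun x => PySem.Int.mod (b - a * x) m)))

-- ===== PORT B =====
-- iterative extended Euclid: returns (g, s, t) with s*a + t*b = g
def extLoop (old_r : Int) (r : Int) (old_s : Int) (s : Int) (old_t : Int) (t : Int) : Int × Int × Int :=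
  if h : r = 0 then (old_r, old_s, old_t)
  else
    let q := PySem.Int.floordiv old_r r
    extLoop r (old_r - q * r) s (old_s - q * s) t (old_t - q * t)
termination_by r.natAbs
decreasing_by
  have hmod := PySem.Int.floordiv_mul_add_mod old_r r
  rcases lt_trichotomy r 0 with hr | hr | hr
  · have hb := PySem.Int.mod_neg_bounds old_r hr
    omega
  · exact absurd hr h
  · have h1 := PySem.Int.mod_nonneg old_r hr
    have h2 := PySem.Int.mod_lt old_r hr
    omega

def ext_gcd (a : Int) (b : Int) : Int × Int × Int := extLoop a b 1 0 0 1

def solve_system_of_congruences_alt (a : Int) (b : Int) (c : Int) (d : Int) (m : Int) : Option (List Int) × Option (List Int) :=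
  let pq := if a < c then (c - a, d - b) else (a - c, b - d)
  let p := pq.1
  let q := pq.2
  let e := ext_gcd m p
  let g := e.1
  let x := e.2.2
  if PySem.Int.mod q g ≠ 0 then (none, none)
  else
    let x0 := PySem.Int.mod (x * PySem.Int.floordiv q g) m
    let step := PySem.Int.floordiv m g
    let xs := (PySem.List.pyRange 0 g 1).map (fun i => PySem.Int.mod (x0 + i * step) m)
    if xs = [] then (none, none)
    else (some xs, some (xs.map (fun x => PySem.Int.mod (b - a * x) m)))

-- ===== PRECONDITION & SPEC =====
-- Pre_ excludes exactly the inputs where Python A raises ZeroDivisionError: m = 0 together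
-- with a = c (gcd is 0, so `b % nod` divides by zero) or (a-c) ∣ (b-d) (then `% m` is `% 0`).
def Pre_solve_system_of_congruences (a : Int) (b : Int) (c : Int) (d : Int) (m : Int) : Prop :=
  m ≠ 0 ∨ (a ≠ c ∧ ¬ (a - c) ∣ (b - d))
instance (a : Int) (b : Int) (c : Int) (d : Int) (m : Int) : Decidable (Pre_solve_system_of_congruences a b c d m) := by unfold Pre_solve_system_of_congruences; infer_instance

def pvWitness_solve_system_of_congruences : Int × Int × Int × Int × Int := (3, 5, 1, 2, 32)

def Spec_solve_system_of_congruences (a : Int) (b : Int) (c : Int) (d : Int) (m : Int) (out : Option (List Int) × Option (List Int)) : Prop := out = solve_system_of_congruences_alt a b c d m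
instance (a : Int) (b : Int) (c : Int) (d : Int) (m : Int) (out : Option (List Int) × Option (List Int)) : Decidable (Spec_solve_system_of_congruences a b c d m out) := by unfold Spec_solve_system_of_congruences; infer_instance

-- ===== CLAIM (what is proved, stated in full; the proofs are below) =====
def Claim_equal_solve_system_of_congruences : Prop := ∀ (a : Int) (b : Int) (c : Int) (d : Int) (m : Int), Dom_solve_system_of_congruences a b c d m → Pre_solve_system_of_congruences a b c d m → Spec_solve_system_of_congruences a b c d m (solve_system_of_congruences a b c d m)

-- ===== LEMMAS AND PROOFS =====

-- Canonical pair-style extended Euclid, the common reference point of both ports.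
def eeRef (r0 : Int) (r1 : Int) : Int × Int × Int :=
  if h : r1 = 0 then (r0, 1, 0)
  else
    let e := eeRef r1 (PySem.Int.mod r0 r1)
    (e.1, e.2.2, e.2.1 - PySem.Int.floordiv r0 r1 * e.2.2)
termination_by r1.natAbs
decreasing_by
  rcases lt_trichotomy r1 0 with hr | hr | hr
  · have hb := PySem.Int.mod_neg_bounds r0 hr
    omega
  · exact absurd hr h
  · have h1 := PySem.Int.mod_nonneg r0 hr
    have h2 := PySem.Int.mod_lt r0 hr
    omega

theorem extLoop_eq_eeRef (r0 r1 s0 s1 t0 t1 : Int) :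
    extLoop r0 r1 s0 s1 t0 t1 =
      ((eeRef r0 r1).1,
       (eeRef r0 r1).2.1 * s0 + (eeRef r0 r1).2.2 * s1,
       (eeRef r0 r1).2.1 * t0 + (eeRef r0 r1).2.2 * t1) := by
  fun_induction extLoop r0 r1 s0 s1 t0 t1 with
  | case1 r0 s0 s1 t0 t1 =>
    rw [eeRef]
    simp
  | case2 r0 r1 s0 s1 t0 t1 h q ih =>
    have hmod : PySem.Int.mod r0 r1 = r0 - q * r1 := by
      have := PySem.Int.floordiv_mul_add_mod r0 r1
      simp only [q]
      omega
    rw [eeRef, dif_neg h]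
    simp only at ih ⊢
    rw [ih, hmod]
    refine Prod.ext rfl (Prod.ext ?_ ?_) <;> simp <;> ring

theorem search_nod_eq_eeRef (a b : Int) :
    search_nod a b = ((eeRef b a).1, (eeRef b a).2.2, (eeRef b a).2.1) := by
  fun_induction search_nod a b with
  | case1 b =>
    rw [eeRef]
    simp
  | case2 a b h r ih =>
    rw [eeRef, dif_neg h]
    simp only [r, ih]

theorem ext_gcd_eq_eeRef (a b : Int) :
    ext_gcd a b = eeRef a b := by
  unfold ext_gcd
  rw [extLoop_eq_eeRef]
  simp

theorem core_eq (p q b a m : Int) :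
    (match solve_congruence p q m with
     | none => (none, none)
     | some [] => (none, none)
     | some xs => (some xs, some (xs.map (fun x => PySem.Int.mod (b - a * x) m)))) =
    (let e := ext_gcd m p
     let g := e.1
     let x := e.2.2
     if PySem.Int.mod q g ≠ 0 then ((none : Option (List Int)), (none : Option (List Int)))
     else
       let x0 := PySem.Int.mod (x * PySem.Int.floordiv q g) m
       let step := PySem.Int.floordiv m g
       let xs := (PySem.List.pyRange 0 g 1).map (fun i => PySem.Int.mod (x0 + i * step) m)
       if xs = [] then (none, none)
       else (some xs, some (xs.map (fun x => PySem.Int.mod (b - a * x) m)))) := by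
  unfold solve_congruence
  rw [search_nod_eq_eeRef, ext_gcd_eq_eeRef]
  simp only
  split_ifs with h1 h2
  · rfl
  · rw [h2]
  · cases hcase : (PySem.List.pyRange 0 (eeRef m p).1 1).map
        (fun i => PySem.Int.mod (PySem.Int.mod ((eeRef m p).2.2 * PySem.Int.floordiv q (eeRef m p).1) m + i * PySem.Int.floordiv m (eeRef m p).1) m) with
    | nil => exact absurd hcase h2
    | cons y ys => rfl

-- ===== VERDICT (by name: the statement is the Claim_ definition above) =====
theorem solve_system_of_congruences_spec : Claim_equal_solve_system_of_congruences := by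
  intro a b c d m _ _
  unfold Spec_solve_system_of_congruences
  unfold solve_system_of_congruences solve_system_of_congruences_alt
  by_cases hac : a < c
  · have h1 : a - c < 0 := by omega
    rw [if_pos h1, if_pos hac]
    have e1 : -(a - c) = c - a := by ring
    have e2 : -(b - d) = d - b := by ring
    rw [e1, e2]
    exact core_eq (c - a) (d - b) b a m
  · have h1 : ¬ (a - c < 0) := by omega
    rw [if_neg h1, if_neg hac]
    exact core_eq (a - c) (b - d) b a m
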